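-- pv_equiv track=rewrite | github.com/mariok99/introProgamacion | CMS2/mesetaMasLarga.py | contarUnaMeseta
-- ===== SOURCE A (Python) =====
-- from typing import List
--
-- def contarUnaMeseta (l: List[int]) -> int:
--     meseta: int = 1
--     i: int = 0
--     if len(l) > 0:
--         while i < (len(l) - 1) and l[i] == l[i + 1]:
--             meseta = meseta + 1
--             i = i + 1
--     else:
--         meseta = 0
--
--     return meseta
-- ===== SOURCE B (Python) =====
-- def contarUnaMeseta(l):
--     if not l:
--         return 0
--     head = l[0]
--     diffs = [i for i, x in enumerate(l) if x != head]
--     return diffs[0] if diffs else len(l)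
-- ===== Notes on version B (the rewrite author's own statement) =====
-- stated objective: alternative
-- what changed: Instead of stepping an index and comparing adjacent pairs with early exit, B does a complete pass collecting every index whose element differs from the head and returns the first such index (the plateau length is the position of the first mismatch against l[0]), or len(l) if none.
import Mathlib
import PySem

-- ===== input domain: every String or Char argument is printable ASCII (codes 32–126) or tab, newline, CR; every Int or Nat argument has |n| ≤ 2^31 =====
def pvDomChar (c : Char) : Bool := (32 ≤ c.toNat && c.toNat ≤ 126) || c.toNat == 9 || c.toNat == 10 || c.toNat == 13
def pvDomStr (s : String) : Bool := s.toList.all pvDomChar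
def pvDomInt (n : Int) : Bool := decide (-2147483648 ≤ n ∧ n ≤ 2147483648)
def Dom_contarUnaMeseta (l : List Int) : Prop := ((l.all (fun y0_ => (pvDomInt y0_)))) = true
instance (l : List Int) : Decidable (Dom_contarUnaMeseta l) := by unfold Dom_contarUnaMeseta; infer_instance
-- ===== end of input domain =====

-- B computes the plateau as the first index of the full list of mismatches against the head (a complete pass), instead of A's early-exit adjacent-pair scan; objective: alternative.


-- ===== PORT A =====
-- the while loop; indices reached by the loop are always in range (i+1 ≤ len-1),
-- so l.getD i 0 is exact for Python's l[i] on every reachable state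
def contarUnaMesetaGo (l : List Int) (i : Nat) (meseta : Int) : Int :=
  if h : i < l.length - 1 ∧ l.getD i 0 = l.getD (i + 1) 0 then
    contarUnaMesetaGo l (i + 1) (meseta + 1)
  else
    meseta
termination_by l.length - i
decreasing_by omega

def contarUnaMeseta (l : List Int) : Int :=
  if l.length > 0 then contarUnaMesetaGo l 0 1 else 0

-- ===== PORT B =====
-- diffs = [i for i, x in enumerate(l) if x != head]; return diffs[0] if diffs else len(l)
-- 'diffs[0] if diffs else len(l)': first element of diffs, defaulting to len(l)
def pvFirstD (ds : List Int) (d0 : Int) : Int :=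
  match ds with
  | [] => d0
  | d :: _ => d

def contarUnaMeseta_alt (l : List Int) : Int :=
  match l with
  | [] => 0
  | x :: _ =>
    pvFirstD (((PySem.List.enumerate l 0).filter (fun p => !(p.2 == x))).map (fun p => p.1))
      (l.length : Int)

-- ===== PRECONDITION & SPEC =====
def Spec_contarUnaMeseta (l : List Int) (out : Int) : Prop := out = contarUnaMeseta_alt l
instance (l : List Int) (out : Int) : Decidable (Spec_contarUnaMeseta l out) := by unfold Spec_contarUnaMeseta; infer_instance

-- ===== CLAIM (what is proved, stated in full; the proofs are below) =====
def Claim_equal_contarUnaMeseta : Prop := ∀ (l : List Int), Dom_contarUnaMeseta l → Spec_contarUnaMeseta l (contarUnaMeseta l)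

-- ===== LEMMAS AND PROOFS =====

-- length of the leading equal run of a suffix
def pvRunlen (l : List Int) : Int :=
  match l with
  | [] => 0
  | x :: xs => ((xs.takeWhile (fun y => y == x)).length : Int)

lemma pvRunlen_cons_eq (x : Int) (xs : List Int) :
    pvRunlen (x :: x :: xs) = 1 + pvRunlen (x :: xs) := by
  simp [pvRunlen, List.takeWhile]
  ring

lemma go_eq_runlen : ∀ (n : Nat) (l : List Int) (i : Nat) (m : Int),
    l.length - i ≤ n → i < l.length →
    contarUnaMesetaGo l i m = m + pvRunlen (l.drop i) := by
  intro n
  induction n with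
  | zero => intro l i m hn hi; omega
  | succ n ih =>
    intro l i m hn hi
    rw [contarUnaMesetaGo]
    by_cases hlt : i < l.length - 1
    · have h1 : i + 1 < l.length := by omega
      have hx : l.getD i 0 = l[i] := List.getD_eq_getElem l 0 hi
      have hy : l.getD (i+1) 0 = l[i+1] := List.getD_eq_getElem l 0 h1
      have hdrop : l.drop i = l[i] :: l.drop (i+1) := List.drop_eq_getElem_cons hi
      have hdrop1 : l.drop (i+1) = l[i+1] :: l.drop (i+2) := List.drop_eq_getElem_cons h1
      by_cases heq : l.getD i 0 = l.getD (i + 1) 0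
      · rw [dif_pos ⟨hlt, heq⟩, ih l (i+1) (m+1) (by omega) h1]
        rw [hdrop, hdrop1]
        have hxy : l[i] = l[i+1] := by rw [← hx, ← hy, heq]
        rw [hxy, hdrop1] at *
        rw [pvRunlen_cons_eq]
        ring
      · rw [dif_neg (by tauto)]
        rw [hdrop, hdrop1]
        have hxy : (l[i+1] == l[i]) = false := by
          simp only [beq_eq_false_iff_ne, ne_eq]
          intro hc; exact heq (by rw [hx, hy, hc])
        simp [pvRunlen, List.takeWhile, hxy]
    · rw [dif_neg (by tauto)]
      -- i = l.length - 1 : the suffix is a single element, run length 0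
      have : l.drop i = [l[i]] := by
        have h := List.drop_eq_getElem_cons hi
        have : l.drop (i+1) = [] := List.drop_eq_nil_of_le (by omega)
        rw [h, this]
      rw [this]
      simp [pvRunlen]

-- mismatch-index characterisation of the first run: scanning enumerate xs s for the
-- first element ≠ x yields s + (leading-run length), with s + |xs| as the default
lemma diffs_head (x : Int) : ∀ (xs : List Int) (s : Int),
    pvFirstD (((PySem.List.enumerate xs s).filter (fun p => !(p.2 == x))).map (fun p => p.1))
      (s + (xs.length : Int))
    = s + ((xs.takeWhile (fun y => y == x)).length : Int) := by
  intro xs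
  induction xs with
  | nil => intro s; simp [PySem.List.enumerate_nil, pvFirstD]
  | cons y ys ih =>
    intro s
    rw [PySem.List.enumerate_cons]
    by_cases hy : y == x
    · have hd : (s + ((y :: ys).length : Int)) = (s + 1) + (ys.length : Int) := by
        simp; ring
      simp only [List.filter, hy, Bool.not_true, List.takeWhile, hd, ih (s + 1)]
      simp; ring
    · have hyb : (y == x) = false := by simpa using hy
      simp [List.filter, List.takeWhile, hyb, pvFirstD]

lemma alt_eq (l : List Int) : contarUnaMeseta_alt l = (if l.length > 0 then 1 + pvRunlen l else 0) := by
  cases l with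
  | nil => simp [contarUnaMeseta_alt]
  | cons x xs =>
    simp only [contarUnaMeseta_alt, List.length_cons, if_pos (by omega : 0 < xs.length + 1)]
    rw [PySem.List.enumerate_cons]
    have hx : (!(x == x)) = false := by simp
    have hd : ((xs.length + 1 : Nat) : Int) = (0 + 1) + (xs.length : Int) := by push_cast; ring
    simp only [List.filter, hx, hd, diffs_head x xs (0 + 1)]
    simp [pvRunlen]

-- ===== VERDICT (by name: the statement is the Claim_ definition above) =====
theorem contarUnaMeseta_spec : Claim_equal_contarUnaMeseta := by
  intro l _
  unfold Spec_contarUnaMeseta contarUnaMeseta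
  rw [alt_eq]
  by_cases h : l.length > 0
  · rw [if_pos h, if_pos h, go_eq_runlen l.length l 0 1 (by omega) h]
    simp
  · rw [if_neg h, if_neg h]
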